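-- pv_equiv track=rewrite | github.com/ganadara135/CorridorRoad | freecad/Corridor_Road/ui/task_cross_section_viewer.py | _flatten_summary_blocks
-- ===== SOURCE A (Python) =====
-- def _flatten_summary_blocks(blocks):
--     lines = []
--     for idx, (title, block_lines) in enumerate(list(blocks or [])):
--         if idx > 0:
--             lines.append("")
--         lines.append(f"{title}:")
--         for line in list(block_lines or []):
--             lines.append(f"  {line}")
--     return lines
-- ===== SOURCE B (Python) =====
-- def _flatten_summary_blocks(blocks):
--     def go(bs):
--         if not bs:
--             return []
--         (title, body), rest = bs[0], go(bs[1:])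
--         return ([f"{title}:"]
--                 + [f"  {line}" for line in list(body or [])]
--                 + ([""] if rest else [])
--                 + rest)
--     return go(list(blocks or []))
-- ===== Notes on version B (the rewrite author's own statement) =====
-- stated objective: alternative
-- what changed: B replaces A's forward indexed loop (separator prepended when idx>0, appending to a shared list) by structural recursion that builds the result back-to-front: each call flattens the tail first and attaches a blank-line separator after the current group only when the recursively built rest is non-empty.
import Mathlib
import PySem

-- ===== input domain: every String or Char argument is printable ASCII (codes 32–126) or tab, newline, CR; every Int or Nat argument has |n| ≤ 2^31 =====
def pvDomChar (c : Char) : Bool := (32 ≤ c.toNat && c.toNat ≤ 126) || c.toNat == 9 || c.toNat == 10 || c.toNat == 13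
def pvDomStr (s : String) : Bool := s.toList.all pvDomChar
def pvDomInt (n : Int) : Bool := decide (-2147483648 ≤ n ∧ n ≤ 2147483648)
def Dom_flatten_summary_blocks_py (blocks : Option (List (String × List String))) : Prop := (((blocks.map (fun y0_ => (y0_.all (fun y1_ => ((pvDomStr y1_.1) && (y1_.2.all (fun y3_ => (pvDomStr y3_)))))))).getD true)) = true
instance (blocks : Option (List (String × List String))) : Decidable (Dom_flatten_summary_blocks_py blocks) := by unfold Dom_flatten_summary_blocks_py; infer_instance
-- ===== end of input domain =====

-- B replaces A's forward indexed loop (separator when idx>0) by structural recursion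
-- built back-to-front: the tail is flattened first and a blank separator is attached
-- after the current group only when the recursively built rest is non-empty.

-- ===== PORT A =====
def flatten_summary_blocks_py (blocks : Option (List (String × List String))) : List String :=
  (PySem.List.enumerate (blocks.getD [])).foldl
    (fun lines p =>
      let lines1 := if p.1 > 0 then lines ++ [""] else lines
      let lines2 := lines1 ++ [p.2.1 ++ ":"]
      p.2.2.foldl (fun ls l => ls ++ ["  " ++ l]) lines2)
    []

-- ===== PORT B =====
def pvGo : List (String × List String) → List String
  | [] => []
  | (title, body) :: bs =>
    let rest := pvGo bs
    ((title ++ ":") :: body.map (fun line => "  " ++ line))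
      ++ (if rest ≠ [] then [""] else []) ++ rest

def flatten_summary_blocks_py_alt (blocks : Option (List (String × List String))) : List String :=
  pvGo (blocks.getD [])

-- ===== PRECONDITION & SPEC =====
def Spec_flatten_summary_blocks_py (blocks : Option (List (String × List String))) (out : List String) : Prop := out = flatten_summary_blocks_py_alt blocks
instance (blocks : Option (List (String × List String))) (out : List String) : Decidable (Spec_flatten_summary_blocks_py blocks out) := by unfold Spec_flatten_summary_blocks_py; infer_instance

-- ===== CLAIM =====
def Claim_equal_flatten_summary_blocks_py : Prop := ∀ (blocks : Option (List (String × List String))), Dom_flatten_summary_blocks_py blocks → Spec_flatten_summary_blocks_py blocks (flatten_summary_blocks_py blocks)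

-- ===== LEMMAS AND PROOFS =====
def pvGroup (p : String × List String) : List String :=
  (p.1 ++ ":") :: p.2.map (fun l => "  " ++ l)

theorem pv_go_flat (bs : List (String × List String)) :
    pvGo bs = match bs with
      | [] => []
      | b :: rest => pvGroup b ++ rest.flatMap (fun b' => "" :: pvGroup b') := by
  induction bs with
  | nil => rfl
  | cons b rest ih =>
    cases rest with
    | nil => simp [pvGo, pvGroup]
    | cons b' rest' =>
      show pvGo (b :: b' :: rest') = _
      rw [pvGo]
      rw [ih]
      have hne : pvGo (b' :: rest') ≠ [] := by rw [ih]; simp [pvGroup]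
      simp only [ih] at hne ⊢
      simp [pvGroup]

theorem pv_inner (l : List String) : ∀ (ls : List String),
    l.foldl (fun ls x => ls ++ ["  " ++ x]) ls = ls ++ l.map (fun x => "  " ++ x) := by
  induction l with
  | nil => simp
  | cons x xs ih => intro ls; simp [List.foldl, ih, List.append_assoc]

theorem pv_tail (bs : List (String × List String)) : ∀ (s : Int) (acc : List String),
    1 ≤ s →
    (PySem.List.enumerate bs s).foldl
      (fun lines p =>
        let lines1 := if p.1 > 0 then lines ++ [""] else lines
        let lines2 := lines1 ++ [p.2.1 ++ ":"]
        p.2.2.foldl (fun ls l => ls ++ ["  " ++ l]) lines2) acc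
    = acc ++ bs.flatMap (fun b' => "" :: pvGroup b') := by
  induction bs with
  | nil => intro s acc _; simp [PySem.List.enumerate_nil]
  | cons b bs ih =>
    intro s acc hs
    rw [PySem.List.enumerate_cons]
    simp only [List.foldl_cons]
    rw [pv_inner]
    rw [ih (s+1) _ (by omega)]
    have h1 : (s > 0) = True := by simp; omega
    simp [h1, pvGroup, List.append_assoc]

theorem pv_main (bs : List (String × List String)) :
    flatten_summary_blocks_py (some bs) = flatten_summary_blocks_py_alt (some bs) := by
  cases bs with
  | nil => rfl
  | cons b bs =>
    unfold flatten_summary_blocks_py flatten_summary_blocks_py_alt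
    simp only [Option.getD_some]
    rw [PySem.List.enumerate_cons]
    simp only [List.foldl_cons]
    rw [pv_inner]
    rw [pv_tail bs (0+1) _ (by omega)]
    rw [pv_go_flat]
    simp [pvGroup]

-- ===== VERDICT =====
theorem flatten_summary_blocks_py_spec : Claim_equal_flatten_summary_blocks_py := by
  intro blocks _
  unfold Spec_flatten_summary_blocks_py
  cases blocks with
  | none => rfl
  | some bs => exact pv_main bs
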